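-- pv_equiv track=rewrite | github.com/dxxdracer/rbdiplab3 | Pyatnashki_after_ref.py | count_inversions_and_empty_row
-- ===== SOURCE A (Python) =====
-- from typing import List, Tuple, Set, Deque
--
-- BOARD_SIZE = 4  # Размер доски 4x4
--
-- def count_inversions_and_empty_row(puzzle: List[int]) -> Tuple[int, int]:
--     inversions = 0
--     empty_row = 0
--     for i in range(len(puzzle)):
--         if puzzle[i] == 0:
--             empty_row = i // BOARD_SIZE
--             continue
--         for j in range(i + 1, len(puzzle)):
--             if puzzle[j] != 0 and puzzle[i] > puzzle[j]:
--                 inversions += 1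
--     return inversions, empty_row
-- ===== SOURCE B (Python) =====
-- from typing import List, Tuple
--
-- BOARD_SIZE = 4
--
-- def count_inversions_and_empty_row(puzzle: List[int]) -> Tuple[int, int]:
--     zeros = [i for i, v in enumerate(puzzle) if v == 0]
--     empty_row = zeros[-1] // BOARD_SIZE if zeros else 0
--
--     def sort_count(a):
--         if len(a) <= 1:
--             return a, 0
--         mid = len(a) // 2
--         left, linv = sort_count(a[:mid])
--         right, rinv = sort_count(a[mid:])
--         merged = []
--         inv = linv + rinv
--         i = j = 0
--         while i < len(left) and j < len(right):
--             if left[i] <= right[j]: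
--                 merged.append(left[i])
--                 i += 1
--             else:
--                 inv += len(left) - i
--                 merged.append(right[j])
--                 j += 1
--         merged.extend(left[i:])
--         merged.extend(right[j:])
--         return merged, inv
--
--     tiles = [v for v in puzzle if v != 0]
--     _, inversions = sort_count(tiles)
--     return inversions, empty_row
-- ===== Notes on version B (the rewrite author's own statement) =====
-- stated objective: faster
-- what changed: Replaces the nested O(n^2) pair scan with merge-sort inversion counting over the nonzero tiles, and computes the empty row from the last zero position found by a single enumerate pass.
import Mathlib
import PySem

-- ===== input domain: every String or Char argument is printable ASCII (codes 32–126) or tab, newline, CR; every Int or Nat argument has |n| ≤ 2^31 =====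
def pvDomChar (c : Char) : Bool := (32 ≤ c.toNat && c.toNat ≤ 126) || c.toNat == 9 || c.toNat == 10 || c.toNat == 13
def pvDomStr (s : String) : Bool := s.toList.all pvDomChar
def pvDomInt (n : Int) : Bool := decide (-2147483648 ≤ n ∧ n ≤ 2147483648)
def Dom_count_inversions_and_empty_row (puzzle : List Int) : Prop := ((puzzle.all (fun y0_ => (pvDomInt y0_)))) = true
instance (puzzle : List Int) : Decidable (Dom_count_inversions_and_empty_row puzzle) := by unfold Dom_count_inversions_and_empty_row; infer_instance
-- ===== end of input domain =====

-- B replaces A's nested O(n^2) pair scan with merge-sort inversion counting over the nonzero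
-- tiles and reads the empty row off the last zero position (objective: faster, asymptotic).

-- ===== PORT A =====
def count_inversions_and_empty_row (puzzle : List Int) : Int × Int :=
  -- inversions = 0; empty_row = 0; for i in range(len(puzzle)): …
  (PySem.List.pyRange 0 (puzzle.length : Int) 1).foldl
    (fun (st : Int × Int) (i : Int) =>
      if PySem.List.pyGetD puzzle i 0 = 0 then
        (st.1, PySem.Int.floordiv i 4)          -- empty_row = i // BOARD_SIZE; continue
      else
        ((PySem.List.pyRange (i + 1) (puzzle.length : Int) 1).foldl
          (fun (inv : Int) (j : Int) =>
            if PySem.List.pyGetD puzzle j 0 ≠ 0 ∧ PySem.List.pyGetD puzzle i 0 > PySem.List.pyGetD puzzle j 0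
            then inv + 1 else inv)
          st.1, st.2))
    (0, 0)

-- ===== PORT B =====
-- the while-merge loop of Source B: consumes the two remaining (sorted) runs, counting
-- len(left)-i whenever an element is taken from the right run; the trailing extends
-- are the [],r / l,[] cases
def pvMergeCount : List Int → List Int → List Int × Int
  | [], r => (r, 0)
  | l, [] => (l, 0)
  | x :: l, y :: r =>
    if x ≤ y then
      let p := pvMergeCount l (y :: r)
      (x :: p.1, p.2)
    else
      let p := pvMergeCount (x :: l) r
      (y :: p.1, p.2 + ((x :: l).length : Int))

-- sort_count of Source B
def pvSortCount (a : List Int) : List Int × Int :=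
  if _h : a.length ≤ 1 then (a, 0)
  else
    let mid := a.length / 2
    let lp := pvSortCount (a.take mid)
    let rp := pvSortCount (a.drop mid)
    let mp := pvMergeCount lp.1 rp.1
    (mp.1, lp.2 + rp.2 + mp.2)
termination_by a.length
decreasing_by
  · simp only [List.length_take]; omega
  · simp only [List.length_drop]; omega

def count_inversions_and_empty_row_alt (puzzle : List Int) : Int × Int :=
  let zeros := ((PySem.List.enumerate puzzle 0).filter (fun p => p.2 == 0)).map (·.1)
  let empty_row := match zeros.getLast? with
    | some z => PySem.Int.floordiv z 4        -- zeros[-1] // BOARD_SIZE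
    | none => 0
  let tiles := puzzle.filter (fun v => v ≠ 0)
  ((pvSortCount tiles).2, empty_row)

-- ===== PRECONDITION & SPEC =====
def Spec_count_inversions_and_empty_row (puzzle : List Int) (out : Int × Int) : Prop := out = count_inversions_and_empty_row_alt puzzle
instance (puzzle : List Int) (out : Int × Int) : Decidable (Spec_count_inversions_and_empty_row puzzle out) := by unfold Spec_count_inversions_and_empty_row; infer_instance

-- ===== CLAIM (what is proved, stated in full; the proofs are below) =====
def Claim_equal_count_inversions_and_empty_row : Prop := ∀ (puzzle : List Int), Dom_count_inversions_and_empty_row puzzle → Spec_count_inversions_and_empty_row puzzle (count_inversions_and_empty_row puzzle)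

-- ===== LEMMAS AND PROOFS =====

-- number of inversions of a list (head against tail, recursively)
def pvNInv : List Int → Nat
  | [] => 0
  | x :: t => t.countP (fun y => decide (y < x)) + pvNInv t

-- cross inversions: pairs (x ∈ s, y ∈ t) with y < x
def pvCross (s t : List Int) : Nat := (s.map (fun x => t.countP (fun y => decide (y < x)))).sum

-- structural rendering of A's outer loop over the suffix xs of the board, i the absolute index
def pvAux : List Int → Int → Int × Int → Int × Int
  | [], _, st => st
  | x :: xs, i, st =>
    if x = 0 then pvAux xs (i + 1) (st.1, PySem.Int.floordiv i 4)
    else pvAux xs (i + 1) (st.1 + ((xs.countP (fun y => decide (y ≠ 0 ∧ y < x)) : Nat) : Int), st.2)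

lemma pvCross_cons_left (x : Int) (l t : List Int) :
    pvCross (x :: l) t = t.countP (fun y => decide (y < x)) + pvCross l t := by
  simp [pvCross]

lemma pvCross_cons_right (l : List Int) (y : Int) (r : List Int) :
    pvCross l (y :: r) = l.countP (fun x => decide (y < x)) + pvCross l r := by
  induction l with
  | nil => simp [pvCross]
  | cons a l ih =>
    simp only [pvCross_cons_left, List.countP_cons] at *
    omega

lemma pvCross_perm_left {l l' : List Int} (h : l.Perm l') (t : List Int) :
    pvCross l t = pvCross l' t := by
  exact List.Perm.sum_eq (h.map _)

lemma pvCross_perm_right (l : List Int) {t t' : List Int} (h : t.Perm t') :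
    pvCross l t = pvCross l t' := by
  unfold pvCross
  congr 1
  exact List.map_congr_left (fun x _ => h.countP_eq _)

lemma pvNInv_append (s t : List Int) :
    pvNInv (s ++ t) = pvNInv s + pvNInv t + pvCross s t := by
  induction s with
  | nil => simp [pvNInv, pvCross]
  | cons x s ih =>
    simp only [List.cons_append, pvNInv, List.countP_append, pvCross_cons_left, ih]
    omega

lemma pvMergeCount_spec : ∀ l r : List Int, l.Pairwise (· ≤ ·) → r.Pairwise (· ≤ ·) →
    (pvMergeCount l r).1.Perm (l ++ r) ∧ (pvMergeCount l r).1.Pairwise (· ≤ ·) ∧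
      (pvMergeCount l r).2 = (pvCross l r : Int) := by
  intro l
  induction l with
  | nil => intro r _ hr; simpa [pvMergeCount, pvCross] using hr
  | cons x l ihl =>
    intro r
    induction r with
    | nil => intro hl _; simpa [pvMergeCount, pvCross] using hl
    | cons y r ihr =>
      intro hl hr
      by_cases hxy : x ≤ y
      · have hl' := (List.pairwise_cons.1 hl).2
        obtain ⟨hperm, hsorted, hcnt⟩ := ihl (y :: r) hl' hr
        simp only [pvMergeCount, if_pos hxy]
        refine ⟨?_, ?_, ?_⟩
        · exact (hperm.cons x).trans (by rfl)
        · refine List.pairwise_cons.2 ⟨?_, hsorted⟩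
          intro a ha
          have ha' := hperm.mem_iff.1 ha
          rcases List.mem_append.1 ha' with h | h
          · exact (List.pairwise_cons.1 hl).1 a h
          · rcases List.mem_cons.1 h with rfl | h
            · exact hxy
            · exact le_trans hxy ((List.pairwise_cons.1 hr).1 a h)
        · rw [hcnt, pvCross_cons_left]
          have : (y :: r).countP (fun z => decide (z < x)) = 0 := by
            rw [List.countP_eq_zero]
            intro z hz
            simp only [decide_eq_true_eq]
            rcases List.mem_cons.1 hz with rfl | h
            · omega
            · have := (List.pairwise_cons.1 hr).1 z h; omega
          omega
      · have hr' := (List.pairwise_cons.1 hr).2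
        obtain ⟨hperm, hsorted, hcnt⟩ := ihr hl hr'
        simp only [pvMergeCount, if_neg hxy]
        refine ⟨?_, ?_, ?_⟩
        · refine (hperm.cons y).trans ?_
          exact (List.perm_middle (a := y) (l₁ := x :: l) (l₂ := r)).symm
        · refine List.pairwise_cons.2 ⟨?_, hsorted⟩
          intro a ha
          have ha' := hperm.mem_iff.1 ha
          rcases List.mem_append.1 ha' with h | h
          · rcases List.mem_cons.1 h with rfl | h
            · omega
            · have := (List.pairwise_cons.1 hl).1 a h; omega
          · exact (List.pairwise_cons.1 hr).1 a h
        · rw [hcnt, pvCross_cons_right]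
          have : (x :: l).countP (fun z => decide (y < z)) = (x :: l).length := by
            rw [List.countP_eq_length]
            intro z hz
            simp only [decide_eq_true_eq]
            rcases List.mem_cons.1 hz with rfl | h
            · omega
            · have := (List.pairwise_cons.1 hl).1 z h; omega
          push_cast [this]
          ring

lemma pvSortCount_spec (a : List Int) :
    (pvSortCount a).1.Perm a ∧ (pvSortCount a).1.Pairwise (· ≤ ·) ∧
      (pvSortCount a).2 = (pvNInv a : Int) := by
  induction a using pvSortCount.induct with
  | case1 a h =>
    rw [pvSortCount, dif_pos h]
    refine ⟨List.Perm.refl a, ?_, ?_⟩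
    · match a, h with
      | [], _ => simp
      | [x], _ => simp
    · match a, h with
      | [], _ => simp [pvNInv]
      | [x], _ => simp [pvNInv]
  | case2 a h mid hl hr =>
    rw [pvSortCount, dif_neg h]
    simp only
    obtain ⟨hlp, hls, hlc⟩ := hl
    obtain ⟨hrp, hrs, hrc⟩ := hr
    obtain ⟨hmp, hms, hmc⟩ := pvMergeCount_spec _ _ hls hrs
    refine ⟨?_, hms, ?_⟩
    · exact hmp.trans ((hlp.append hrp).trans (by rw [List.take_append_drop]))
    · rw [hmc, hlc, hrc]
      have hcr : pvCross (pvSortCount (a.take mid)).1 (pvSortCount (a.drop mid)).1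
          = pvCross (a.take mid) (a.drop mid) := by
        rw [pvCross_perm_left hlp, pvCross_perm_right _ hrp]
      rw [hcr]
      have := pvNInv_append (a.take mid) (a.drop mid)
      rw [List.take_append_drop] at this
      rw [this]
      push_cast
      ring

lemma pvAux_fst : ∀ (xs : List Int) (i : Int) (st : Int × Int),
    (pvAux xs i st).1 = st.1 + (pvNInv (xs.filter (fun y => y ≠ 0)) : Int) := by
  intro xs
  induction xs with
  | nil => intro i st; simp [pvAux, pvNInv]
  | cons x xs ih =>
    intro i st
    by_cases hx : x = 0
    · simp only [pvAux, if_pos hx]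
      rw [ih]
      simp [hx]
    · simp only [pvAux, if_neg hx, ih]
      have hc : xs.countP (fun y => decide (y ≠ 0 ∧ y < x))
          = (xs.filter (fun y => decide (y ≠ 0))).countP (fun y => decide (y < x)) := by
        rw [List.countP_filter]
        congr 1
        funext y
        by_cases hy : y = 0 <;> by_cases hyx : y < x <;> simp [hy, hyx]
      rw [List.filter_cons_of_pos (by simpa using hx)]
      simp only [pvNInv, hc]
      push_cast
      ring

lemma pvAux_snd : ∀ (xs : List Int) (s : Int) (st : Int × Int),
    (pvAux xs s st).2 =
      (match (((PySem.List.enumerate xs s).filter (fun p => p.2 == 0)).map (·.1)).getLast? with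
        | some z => PySem.Int.floordiv z 4
        | none => st.2) := by
  intro xs
  induction xs with
  | nil => intro s st; simp [pvAux, PySem.List.enumerate_nil]
  | cons x xs ih =>
    intro s st
    rw [PySem.List.enumerate_cons]
    by_cases hx : x = 0
    · simp only [pvAux, if_pos hx]
      rw [ih, List.filter_cons_of_pos (by simp [hx]), List.map_cons, List.getLast?_cons]
      rcases h : (((PySem.List.enumerate xs (s + 1)).filter (fun p => p.2 == 0)).map (·.1)).getLast? with _ | z <;>
        rw [h] <;> simp only [Option.getD_none, Option.getD_some]
    · simp only [pvAux, if_neg hx, ih]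
      rw [List.filter_cons_of_neg (by simpa using hx)]

lemma pvA_loop : ∀ (xs : List Int) (s : Nat) (st : Int × Int) (full : List Int),
    full.drop s = xs →
    (PySem.List.pyRange (s : Int) (full.length : Int) 1).foldl
      (fun (st : Int × Int) (i : Int) =>
        if PySem.List.pyGetD full i 0 = 0 then
          (st.1, PySem.Int.floordiv i 4)
        else
          ((PySem.List.pyRange (i + 1) (full.length : Int) 1).foldl
            (fun (inv : Int) (j : Int) =>
              if PySem.List.pyGetD full j 0 ≠ 0 ∧ PySem.List.pyGetD full i 0 > PySem.List.pyGetD full j 0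
              then inv + 1 else inv)
            st.1, st.2)) st
      = pvAux xs (s : Int) st := by
  intro xs
  induction xs with
  | nil =>
    intro s st full h
    have hlen : full.length ≤ s := List.drop_eq_nil_iff.1 h
    rw [PySem.List.pyRange_one_eq_nil (by exact_mod_cast hlen)]
    simp [pvAux]
  | cons x xs ih =>
    intro s st full h
    have hs : s < full.length := by
      by_contra hc
      rw [List.drop_eq_nil_of_le (by omega)] at h
      simp at h
    have hd := List.drop_eq_getElem_cons hs
    rw [h] at hd
    injection hd with hd1 hd2
    have hget : PySem.List.pyGetD full (s : Int) 0 = x := by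
      rw [PySem.List.pyGetD_natCast]
      rw [List.getD_eq_getElem?_getD, List.getElem?_eq_getElem hs, hd1]
      rfl
    have h1 : full.drop (s + 1) = xs := by
      rw [← List.tail_drop, h]
      rfl
    rw [PySem.List.pyRange_one_cons (by exact_mod_cast hs), List.foldl_cons]
    simp only [hget]
    have hcast : (s : Int) + 1 = ((s + 1 : Nat) : Int) := by push_cast; ring
    by_cases hx : x = 0
    · rw [if_pos hx, hcast, ih (s + 1) _ full h1]
      simp only [pvAux, if_pos hx, hcast]
    · rw [if_neg hx]
      have hinner :
          (PySem.List.pyRange ((s : Int) + 1) (full.length : Int) 1).foldl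
            (fun (inv : Int) (j : Int) =>
              if PySem.List.pyGetD full j 0 ≠ 0 ∧ x > PySem.List.pyGetD full j 0
              then inv + 1 else inv) st.1
          = st.1 + (xs.countP (fun y => decide (y ≠ 0 ∧ y < x)) : Nat) := by
        have hbody : (fun (inv : Int) (j : Int) =>
              if PySem.List.pyGetD full j 0 ≠ 0 ∧ x > PySem.List.pyGetD full j 0
              then inv + 1 else inv)
            = (fun (inv : Int) (j : Int) =>
                (fun (acc : Int) (y : Int) => if decide (y ≠ 0 ∧ y < x) then acc + 1 else acc)
                  inv (PySem.List.pyGetD full j 0)) := by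
          funext inv j
          by_cases hc : PySem.List.pyGetD full j 0 ≠ 0 ∧ PySem.List.pyGetD full j 0 < x <;>
            simp [hc, GT.gt]
        rw [hbody,
          PySem.List.foldl_pyRange_pyGetD' full 0
            (fun (acc : Int) (y : Int) => if decide (y ≠ 0 ∧ y < x) then acc + 1 else acc) st.1
            (by omega : (0:Int) ≤ (s:Int) + 1)]
        rw [show ((s : Int) + 1).toNat = s + 1 by omega, h1]
        rw [PySem.List.foldl_count_if]
      rw [hinner, hcast, ih (s + 1) _ full h1]
      simp only [pvAux, hcast]
      rw [if_neg hx]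

theorem pv_main (puzzle : List Int) :
    count_inversions_and_empty_row puzzle = count_inversions_and_empty_row_alt puzzle := by
  unfold count_inversions_and_empty_row count_inversions_and_empty_row_alt
  have hA := pvA_loop puzzle 0 (0, 0) puzzle (by simp)
  simp only [Nat.cast_zero] at hA
  rw [hA]
  dsimp only
  refine Prod.ext ?_ ?_
  · rw [pvAux_fst, (pvSortCount_spec _).2.2]
    simp
  · rw [pvAux_snd]

-- ===== VERDICT (by name: the statement is the Claim_ definition above) =====
theorem count_inversions_and_empty_row_spec : Claim_equal_count_inversions_and_empty_row := by
  intro puzzle _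
  unfold Spec_count_inversions_and_empty_row
  exact pv_main puzzle
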